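-- pv_equiv track=rewrite | github.com/MrBrantCode/unitest_baseline | mut_generate/mist_train_cf/cf_1372/solution.py | inverse_dictionary
-- ===== SOURCE A (Python) =====
-- def inverse_dictionary(dictionary):
--     inversed_dictionary = {}
--     for key, value in dictionary.items():
--         if value not in inversed_dictionary:
--             inversed_dictionary[value] = [key]
--         else:
--             inversed_dictionary[value].append(key)
--     # Remove duplicate values
--     inversed_dictionary = {key: value[0] for key, value in inversed_dictionary.items() if len(value) == 1}
--     return inversed_dictionary
-- ===== SOURCE B (Python) =====
-- def inverse_dictionary(dictionary):
--     inversed = {}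
--     dropped = set()
--     for key, value in dictionary.items():
--         if value in dropped:
--             continue
--         if value in inversed:
--             del inversed[value]
--             dropped.add(value)
--         else:
--             inversed[value] = key
--     return inversed
-- ===== Notes on version B (the rewrite author's own statement) =====
-- stated objective: alternative
-- what changed: A makes two staged passes (group keys into per-value lists, then filter the singleton lists); B is a single online pass that maintains the inverted dict directly, deleting a value's entry the moment the value repeats and remembering repeated values in a dropped set.
import Mathlib
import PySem

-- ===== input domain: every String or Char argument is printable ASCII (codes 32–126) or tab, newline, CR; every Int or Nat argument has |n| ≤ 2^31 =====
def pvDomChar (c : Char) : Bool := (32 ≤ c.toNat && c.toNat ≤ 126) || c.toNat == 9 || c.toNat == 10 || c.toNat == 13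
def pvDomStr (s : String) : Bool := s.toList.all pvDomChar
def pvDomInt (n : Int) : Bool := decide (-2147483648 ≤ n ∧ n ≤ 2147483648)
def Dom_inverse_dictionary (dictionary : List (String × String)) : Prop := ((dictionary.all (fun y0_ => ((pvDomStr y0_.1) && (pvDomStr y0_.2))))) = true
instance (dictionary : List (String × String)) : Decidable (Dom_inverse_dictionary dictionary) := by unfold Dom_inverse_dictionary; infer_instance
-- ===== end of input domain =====

-- B replaces A's "group keys into per-value lists, then keep the singleton groups" by a
-- single online pass that maintains the inverted dict directly, DELETING a value's entry
-- the moment the value repeats (remembering it in a dropped-set) — same O(n) cost, one pass.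


-- ===== PORT A =====
def inverse_dictionary (dictionary : List (String × String)) : List (String × String) :=
  -- for key, value in dictionary.items(): group keys by value
  let inv : PySem.Dict String (List String) :=
    dictionary.foldl (fun d kv =>
      if !(d.contains kv.2) then d.insert kv.2 [kv.1]
      else d.modify kv.2 [] (fun ks => ks ++ [kv.1])) PySem.Dict.empty
  -- {key: value[0] for key, value in inversed_dictionary.items() if len(value) == 1}
  let out : PySem.Dict String String :=
    inv.items.foldl (fun d p =>
      if PySem.List.len p.2 == 1 then d.insert p.1 (PySem.List.pyGetD p.2 0 "") else d)
      PySem.Dict.empty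
  out.items

-- ===== PORT B =====
-- loop body of Source B: skip values already dropped; on a repeat, delete the entry and drop
-- the value; otherwise record value -> key
def pvStepB (st : PySem.Dict String String × PySem.Set String) (kv : String × String) :
    PySem.Dict String String × PySem.Set String :=
  if st.2.contains kv.2 then st
  else if st.1.contains kv.2 then (st.1.erase kv.2, st.2.add kv.2)
  else (st.1.insert kv.2 kv.1, st.2)

def inverse_dictionary_alt (dictionary : List (String × String)) : List (String × String) :=
  (dictionary.foldl pvStepB (PySem.Dict.empty, PySem.Set.empty)).1.items

-- ===== PRECONDITION & SPEC =====
def Spec_inverse_dictionary (dictionary : List (String × String)) (out : List (String × String)) : Prop := out = inverse_dictionary_alt dictionary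
instance (dictionary : List (String × String)) (out : List (String × String)) : Decidable (Spec_inverse_dictionary dictionary out) := by unfold Spec_inverse_dictionary; infer_instance

-- ===== CLAIM (what is proved, stated in full; the proofs are below) =====
def Claim_equal_inverse_dictionary : Prop := ∀ (dictionary : List (String × String)), Dom_inverse_dictionary dictionary → Spec_inverse_dictionary dictionary (inverse_dictionary dictionary)

-- ===== LEMMAS AND PROOFS =====

-- canonical common value: the (value, key) pairs whose value occurs exactly once,
-- in the order of those sole occurrences
def pvCanon (dictionary : List (String × String)) : List (String × String) :=
  (dictionary.map (fun kv => (kv.2, kv.1))).filter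
    (fun p => decide (((dictionary.map (fun kv => (kv.2, kv.1))).map Prod.fst).count p.1 = 1))

-- filtering set(xs) by a predicate that only holds on count-1 elements = filtering xs itself
theorem pv_filter_ofList {α : Type} [BEq α] [LawfulBEq α] (xs : List α) (p : α → Bool)
    (h : ∀ v, p v = true → xs.count v ≤ 1) :
    (PySem.Set.ofList xs).filter p = xs.filter p := by
  induction xs with
  | nil => simp [PySem.Set.ofList_nil]
  | cons x xs ih =>
    rw [PySem.Set.ofList_cons]
    have hxs : ∀ v, p v = true → xs.count v ≤ 1 := by
      intro v hv
      have h1 := h v hv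
      have h2 : xs.count v ≤ (x :: xs).count v := by
        rw [List.count_cons]; split <;> omega
      omega
    by_cases hpx : p x = true
    · have hx0 : x ∉ xs := by
        have := h x hpx
        rw [List.count_cons_self] at this
        exact List.count_eq_zero.mp (by omega)
      have hdisc : (PySem.Set.ofList xs).discard x = PySem.Set.ofList xs := by
        unfold PySem.Set.discard
        rw [List.filter_eq_self]
        intro a ha
        have : a ∈ xs := (PySem.Set.mem_ofList xs a).mp ha
        simp
        rintro rfl; exact hx0 this
      simp only [List.filter_cons, hpx, if_true, hdisc, ih hxs]
    · have hpx' : p x = false := by simpa using hpx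
      simp only [List.filter_cons, hpx', Bool.false_eq_true, if_false]
      unfold PySem.Set.discard
      rw [List.filter_filter]
      have hpq : ∀ a, (p a && !(a == x)) = p a := by
        intro a
        by_cases hpa : p a = true
        · have hax : a ≠ x := by rintro rfl; rw [hpa] at hpx'; cases hpx'
          simp [hpa, hax]
        · simp [Bool.eq_false_iff.mpr hpa]
      rw [List.filter_congr (fun a _ => hpq a), ih hxs]

-- a count-1 value's group of keys is the singleton of its sole occurrence
theorem pv_group_singleton {q : List (String × String)} {kv : String × String}
    (hmem : kv ∈ q) (hcnt : (q.map Prod.fst).count kv.1 = 1) :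
    q.filter (fun p => p.1 == kv.1) = [kv] := by
  have hlen : (q.filter (fun p => p.1 == kv.1)).length = 1 := by
    rw [← List.countP_eq_length_filter]
    rw [List.count_eq_countP, List.countP_map] at hcnt
    simpa using hcnt
  obtain ⟨a, ha⟩ := List.length_eq_one_iff.mp hlen
  have hin : kv ∈ q.filter (fun p => p.1 == kv.1) := by
    rw [List.mem_filter]; exact ⟨hmem, by simp⟩
  rw [ha] at hin
  simp at hin
  rw [ha, hin]

-- port A computes pvCanon
theorem pvA_eq_canon (l : List (String × String)) : inverse_dictionary l = pvCanon l := by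
  have e : inverse_dictionary l
      = ((l.foldl (fun d kv =>
            if !(d.contains kv.2) then d.insert kv.2 [kv.1]
            else d.modify kv.2 [] (fun ks => ks ++ [kv.1]))
            (PySem.Dict.empty : PySem.Dict String (List String))).items.foldl
          (fun d p =>
            if PySem.List.len p.2 == 1 then d.insert p.1 (PySem.List.pyGetD p.2 0 "") else d)
          (PySem.Dict.empty : PySem.Dict String String)).items := rfl
  rw [e]; clear e
  set q : List (String × String) := l.map (fun kv => (kv.2, kv.1)) with hq
  set ks : List String := q.map Prod.fst with hks
  -- step 1: the grouping loop is an unconditional modify-loop over q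
  have hstep : (fun (d : PySem.Dict String (List String)) (kv : String × String) =>
      if !(d.contains kv.2) then d.insert kv.2 [kv.1]
      else d.modify kv.2 [] (fun ks => ks ++ [kv.1]))
      = fun d kv => d.modify kv.2 [] (fun ks => ks ++ [kv.1]) := by
    funext d kv
    by_cases hc : d.contains kv.2
    · simp [hc]
    · have hc' : d.contains kv.2 = false := by simpa using hc
      simp only [hc', Bool.not_false, if_true]
      unfold PySem.Dict.modify
      rw [PySem.Dict.getD_of_not_contains d [] hc']
      simp
  rw [hstep, show (l.foldl (fun d kv => d.modify kv.2 [] (fun ks => ks ++ [kv.1]))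
      (PySem.Dict.empty : PySem.Dict String (List String)))
      = q.foldl (fun d p => d.modify p.1 [] (fun ks => ks ++ [p.2])) PySem.Dict.empty
    from by rw [hq, List.foldl_map]]
  set inv : PySem.Dict String (List String) :=
    q.foldl (fun d p => d.modify p.1 [] (fun ks => ks ++ [p.2])) PySem.Dict.empty with hinvdef
  -- keys and lookups of inv
  have hkeys : inv.keys = PySem.Set.ofList ks := by
    rw [hinvdef, PySem.Dict.keys_foldl_modify_key q Prod.fst [] (fun _ x ks => ks ++ [x.2]),
      PySem.Dict.keys_empty, PySem.Set.update_nil_left]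
  have hnd : inv.keys.Nodup := by rw [hkeys]; exact PySem.Set.nodup_ofList ks
  have hget : ∀ v, inv.getD v [] = (q.filter (fun p => p.1 == v)).map Prod.snd := by
    intro v
    rw [hinvdef, PySem.Dict.getD_foldl_modify_append q PySem.Dict.empty v,
      PySem.Dict.getD_empty]
    simp
  have hitems : inv.items
      = (PySem.Set.ofList ks).map (fun v => (v, (q.filter (fun p => p.1 == v)).map Prod.snd)) := by
    rw [PySem.Dict.items_eq_map_keys inv hnd [], hkeys]
    exact List.map_congr_left (fun v _ => by rw [hget v])
  -- step 2: the comprehension loop = fold of inserts over the filtered items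
  have hff := List.foldl_filter
    (p := fun p : String × List String => PySem.List.len p.2 == 1)
    (f := fun (d : PySem.Dict String String) p => d.insert p.1 (PySem.List.pyGetD p.2 0 ""))
    (l := inv.items) (init := PySem.Dict.empty)
  rw [← hff]
  rw [PySem.Dict.items_foldl_insert_fresh _ Prod.fst (fun p => PySem.List.pyGetD p.2 0 "")
    PySem.Dict.empty (fun a _ => PySem.Dict.contains_empty a.1)
    (by
      have hsub : (inv.items.filter (fun p => PySem.List.len p.2 == 1)).Sublist inv.items :=
        List.filter_sublist
      exact hnd.sublist (hsub.map Prod.fst))]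
  -- compute the filtered items
  rw [hitems, List.filter_map, List.map_map]
  have hcc : ∀ v, List.countP (fun p : String × String => p.1 == v) q = ks.count v := by
    intro v
    simp only [hks, hq, List.count_eq_countP, List.countP_map]
    exact List.countP_congr (fun a _ => by simp [Function.comp])
  have hcond : ∀ v ∈ PySem.Set.ofList ks,
      ((fun p : String × List String => PySem.List.len p.2 == 1) ∘
        fun v => (v, (q.filter (fun p => p.1 == v)).map Prod.snd)) v
      = decide (ks.count v = 1) := by
    intro v _
    show (PySem.List.len ((q.filter (fun p => p.1 == v)).map Prod.snd) == 1)
        = decide (ks.count v = 1)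
    have hlen2 : PySem.List.len ((q.filter (fun p => p.1 == v)).map Prod.snd)
        = (ks.count v : Int) := by
      simp only [PySem.List.len, List.length_map, ← List.countP_eq_length_filter, hcc]
    rw [hlen2]
    by_cases h1 : ks.count v = 1
    · simp [h1]
    · have h2 : ¬ ((ks.count v : Int) = 1) := by exact_mod_cast h1
      simp [h1, h2]
  rw [List.filter_congr hcond]
  rw [pv_filter_ofList ks (fun v => decide (ks.count v = 1)) (fun v hv => by
    simp at hv; omega)]
  -- step 3: per-element, the group is the singleton of the sole occurrence
  rw [hks, List.filter_map, List.map_map]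
  unfold pvCanon
  rw [← hq, ← hks]
  have hempty : (PySem.Dict.empty : PySem.Dict String String).items = [] := rfl
  rw [hempty, List.nil_append]
  have hmapid : ∀ kv ∈ q.filter ((fun v => decide (ks.count v = 1)) ∘ Prod.fst),
      (((fun a : String × List String => (a.1, PySem.List.pyGetD a.2 0 "")) ∘
        fun v => (v, (q.filter (fun p => p.1 == v)).map Prod.snd)) ∘ Prod.fst) kv = kv := by
    intro kv hkv
    rw [List.mem_filter] at hkv
    obtain ⟨hmem, hc⟩ := hkv
    have hcnt : (q.map Prod.fst).count kv.1 = 1 := by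
      rw [← hks]; simpa using hc
    have hg := pv_group_singleton hmem hcnt
    simp only [Function.comp, hg, List.map_cons, List.map_nil,
      PySem.List.pyGetD_zero_cons]
  rw [List.map_congr_left hmapid, List.map_id']
  exact List.filter_congr (fun x _ => by simp [Function.comp])

-- loop invariant for B's single pass over the prefix p: the dict holds exactly the
-- (value, key) pairs whose value occurs once in p (in order), the dropped set the
-- values occurring at least twice
theorem pvB_inv (p : List (String × String)) :
    (p.foldl pvStepB (PySem.Dict.empty, PySem.Set.empty)).1.items
      = (p.map (fun kv => (kv.2, kv.1))).filter
          (fun q => decide ((p.map Prod.snd).count q.1 = 1))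
    ∧ ∀ v, (p.foldl pvStepB (PySem.Dict.empty, PySem.Set.empty)).2.contains v
      = decide (2 ≤ (p.map Prod.snd).count v) := by
  induction p using List.reverseRecOn with
  | nil => exact ⟨rfl, fun v => rfl⟩
  | append_singleton p kv ih =>
    obtain ⟨ih1, ih2⟩ := ih
    rw [List.foldl_append, show ∀ t, List.foldl pvStepB t [kv] = pvStepB t kv from fun t => rfl]
    set s := p.foldl pvStepB (PySem.Dict.empty, PySem.Set.empty) with hs
    set c0 : Nat := (p.map Prod.snd).count kv.2 with hc0
    -- the new counts
    have hcnt : ∀ v, ((p ++ [kv]).map Prod.snd).count v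
        = (p.map Prod.snd).count v + (if kv.2 = v then 1 else 0) := by
      intro v
      rw [List.map_append, List.count_append]
      congr 1
      by_cases he : kv.2 = v
      · subst he; simp
      · have hv : ¬ v = kv.2 := fun hx => he hx.symm
        simp [he]
    -- s.1.contains kv.2 decides c0 = 1
    have hcont1 : s.1.contains kv.2 = decide (c0 = 1) := by
      unfold PySem.Dict.contains
      rw [ih1]
      by_cases h1 : c0 = 1
      · have hx : ∃ kv' ∈ p, kv'.2 = kv.2 := by
          have : kv.2 ∈ p.map Prod.snd := by
            rw [← List.count_pos_iff]; omega
          simpa using this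
        obtain ⟨kv', hmem, hv⟩ := hx
        have : (kv'.2, kv'.1) ∈ (p.map (fun kv => (kv.2, kv.1))).filter
            (fun q => decide ((p.map Prod.snd).count q.1 = 1)) := by
          rw [List.mem_filter]
          constructor
          · exact List.mem_map.mpr ⟨kv', hmem, rfl⟩
          · simp only [hv]; simpa using h1
        simp only [h1, decide_true]
        exact List.any_eq_true.mpr ⟨(kv'.2, kv'.1), this, by simp [hv]⟩
      · simp only [h1, decide_false]
        apply List.any_eq_false.mpr
        intro q hq
        rw [List.mem_filter] at hq
        simp only [beq_iff_eq]
        intro he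
        have := hq.2
        rw [he] at this
        simp at this
        exact h1 (by rw [hc0]; exact this)
    -- dropped-set membership at kv.2 decides 2 ≤ c0
    have hcont2 := ih2 kv.2
    by_cases h2 : 2 ≤ c0
    · -- value already dropped: skip, nothing changes
      have hb : s.2.contains kv.2 = true := by rw [hcont2]; simpa using h2
      have : pvStepB s kv = s := by
        unfold pvStepB
        rw [if_pos hb]
      rw [this]
      refine ⟨?_, ?_⟩
      · rw [ih1, List.map_append (f := fun kv : String × String => (kv.2, kv.1)) (l₁ := p) (l₂ := [kv]), List.filter_append]
        have hlast : List.filter (fun q => decide (((p ++ [kv]).map Prod.snd).count q.1 = 1))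
            ([kv].map (fun kv => (kv.2, kv.1))) = [] := by
          simp only [List.map_cons, List.map_nil, List.filter_cons, List.filter_nil]
          rw [hcnt kv.2]
          have h0' : ¬ ((p.map Prod.snd).count kv.2 = 0) := by omega
          simp [h0']
        rw [hlast, List.append_nil]
        apply List.filter_congr
        intro q hq
        rw [hcnt q.1]
        by_cases he : kv.2 = q.1
        · have hge : 2 ≤ (p.map Prod.snd).count q.1 := by rw [← he]; exact h2
          have hn1 : ¬ ((p.map Prod.snd).count q.1 = 1) := by omega
          have hn2 : ¬ ((p.map Prod.snd).count q.1 + (if kv.2 = q.1 then 1 else 0) = 1) := by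
            split <;> omega
          simp [hn1, hn2]
        · simp [he]
      · intro v
        rw [ih2 v, hcnt v]
        by_cases he : kv.2 = v
        · subst he
          have hl : 2 ≤ (p.map Prod.snd).count kv.2 := h2
          have hr : 2 ≤ (p.map Prod.snd).count kv.2 + 1 := by omega
          simp [hl, hr]
        · simp [he]
    · by_cases h1 : c0 = 1
      · -- second occurrence: the entry is deleted, the value dropped
        have hb2 : ¬ (s.2.contains kv.2 = true) := by rw [hcont2]; simpa using h2
        have hb1 : s.1.contains kv.2 = true := by rw [hcont1]; simpa using h1
        have : pvStepB s kv = (s.1.erase kv.2, s.2.add kv.2) := by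
          unfold pvStepB
          rw [if_neg hb2, if_pos hb1]
        rw [this]
        refine ⟨?_, ?_⟩
        · show (s.1.erase kv.2).items = _
          unfold PySem.Dict.erase
          show List.filter (fun q => !q.1 == kv.2) s.1.items = _
          rw [ih1, List.filter_filter, List.map_append (f := fun kv : String × String => (kv.2, kv.1)) (l₁ := p) (l₂ := [kv]), List.filter_append]
          have hlast : List.filter (fun q => decide (((p ++ [kv]).map Prod.snd).count q.1 = 1))
              ([kv].map (fun kv => (kv.2, kv.1))) = [] := by
            simp only [List.map_cons, List.map_nil, List.filter_cons, List.filter_nil]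
            rw [hcnt kv.2]
            have : ¬ ((p.map Prod.snd).count kv.2 = 0) := by omega
            simp [this]
          rw [hlast, List.append_nil]
          apply List.filter_congr
          intro q hq
          rw [hcnt q.1]
          by_cases he : kv.2 = q.1
          · have hq1 : (p.map Prod.snd).count q.1 = 1 := by rw [← he]; exact h1
            have hn : ¬ ((p.map Prod.snd).count q.1 + (if kv.2 = q.1 then 1 else 0) = 1) := by
              rw [if_pos he]; omega
            have hb : (q.1 == kv.2) = true := by simp [he]
            simp [hb, hn]
          · have hb : (q.1 == kv.2) = false := by simp; intro hx; exact he hx.symm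
            simp [hb, he]
        · intro v
          show (s.2.add kv.2).contains v = _
          unfold PySem.Set.add
          rw [hcnt v]
          by_cases hsc : s.2.contains kv.2 = true
          · rw [hcont2] at hsc; simp at hsc; omega
          · rw [if_neg hsc]
            unfold PySem.Set.contains
            rw [List.contains_append]
            show (s.2.contains v || [kv.2].contains v) = _
            rw [ih2 v]
            by_cases he : kv.2 = v
            · subst he
              have : (p.map Prod.snd).count kv.2 + 1 = 2 := by omega
              simp [this]
            · have hb : ([kv.2].contains v) = false := by
                simp [List.contains_eq_mem]; intro hx; exact he hx.symm
              simp [he]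
              intro hx
              exact absurd hx.symm he
      · -- first occurrence: insert value -> key
        have hc00 : c0 = 0 := by omega
        have hb2 : ¬ (s.2.contains kv.2 = true) := by rw [hcont2]; simpa using h2
        have hnc : s.1.contains kv.2 = false := by rw [hcont1]; simp [h1]
        have hb1 : ¬ (s.1.contains kv.2 = true) := by simp [hnc]
        have : pvStepB s kv = (s.1.insert kv.2 kv.1, s.2) := by
          unfold pvStepB
          rw [if_neg hb2, if_neg hb1]
        rw [this]
        refine ⟨?_, ?_⟩
        · show (s.1.insert kv.2 kv.1).items = _
          rw [PySem.Dict.items_insert_of_not_contains s.1 kv.1 hnc, ih1,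
            List.map_append (f := fun kv : String × String => (kv.2, kv.1)) (l₁ := p) (l₂ := [kv]), List.filter_append]
          have hlast : List.filter (fun q => decide (((p ++ [kv]).map Prod.snd).count q.1 = 1))
              ([kv].map (fun kv => (kv.2, kv.1))) = [(kv.2, kv.1)] := by
            simp only [List.map_cons, List.map_nil, List.filter_cons, List.filter_nil]
            rw [hcnt kv.2]
            have : (p.map Prod.snd).count kv.2 + 1 = 1 := by omega
            simp [this]
          rw [hlast]
          congr 1
          apply List.filter_congr
          intro q hq
          rw [hcnt q.1]
          by_cases he : kv.2 = q.1
          · exfalso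
            obtain ⟨kv', hmem, hkv'⟩ := List.mem_map.mp
              (by exact hq : q ∈ p.map (fun kv => (kv.2, kv.1)))
            have : kv'.2 ∈ p.map Prod.snd := List.mem_map.mpr ⟨kv', hmem, rfl⟩
            have hq1 : q.1 = kv'.2 := by rw [← hkv']
            have : kv.2 ∈ p.map Prod.snd := by rw [he, hq1]; exact this
            have := List.count_pos_iff.mpr this
            omega
          · simp [he]
        · intro v
          rw [ih2 v, hcnt v]
          by_cases he : kv.2 = v
          · subst he
            have hl : ¬ 2 ≤ (p.map Prod.snd).count kv.2 := h2
            have hr : ¬ 2 ≤ (p.map Prod.snd).count kv.2 + 1 := by omega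
            simp [hl, hr]
          · simp [he]

-- port B computes pvCanon
theorem pvB_eq_canon (l : List (String × String)) : inverse_dictionary_alt l = pvCanon l := by
  show (l.foldl pvStepB (PySem.Dict.empty, PySem.Set.empty)).1.items = pvCanon l
  rw [(pvB_inv l).1]
  unfold pvCanon
  rw [List.map_map,
    show l.map (Prod.fst ∘ fun kv : String × String => (kv.2, kv.1)) = l.map Prod.snd
      from List.map_congr_left (fun a _ => rfl)]

-- ===== VERDICT (by name: the statement is the Claim_ definition above) =====
theorem inverse_dictionary_spec : Claim_equal_inverse_dictionary := by
  intro l _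
  unfold Spec_inverse_dictionary
  rw [pvA_eq_canon, pvB_eq_canon]
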